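-- pv_equiv track=rewrite | github.com/ellismckenzielee/codewars-python | pairs_of_bears.py | bears
-- ===== SOURCE A (Python) =====
-- def bears(x,s):
--     output = ""
--     previous = False
--     counts = 0
--     for i in range(0, len(s) -1):
--         letters = s[i] + s[i+1]
--         if (letters == 'B8' or letters == '8B') and previous == False:
--             output += letters
--             previous = True
--             counts += 1
--         else:
--             previous = False
--     return [output,  counts >= x]
-- ===== SOURCE B (Python) =====
-- def bears(x, s):
--     parts = []
--     i = 0
--     while i + 1 < len(s):
--         pair = s[i:i+2]
--         if pair in ('B8', '8B'):
--             parts.append(pair)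
--             i += 2
--         else:
--             i += 1
--     return [''.join(parts), len(parts) >= x]
-- ===== Notes on version B (the rewrite author's own statement) =====
-- stated objective: simpler
-- what changed: Replaces A's flag-carrying pass over every adjacent pair (a 'previous' boolean suppressing overlapping matches) by an index-jumping scan that advances 2 past a match and 1 otherwise, collecting matches in a list joined once at the end.
import Mathlib
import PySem

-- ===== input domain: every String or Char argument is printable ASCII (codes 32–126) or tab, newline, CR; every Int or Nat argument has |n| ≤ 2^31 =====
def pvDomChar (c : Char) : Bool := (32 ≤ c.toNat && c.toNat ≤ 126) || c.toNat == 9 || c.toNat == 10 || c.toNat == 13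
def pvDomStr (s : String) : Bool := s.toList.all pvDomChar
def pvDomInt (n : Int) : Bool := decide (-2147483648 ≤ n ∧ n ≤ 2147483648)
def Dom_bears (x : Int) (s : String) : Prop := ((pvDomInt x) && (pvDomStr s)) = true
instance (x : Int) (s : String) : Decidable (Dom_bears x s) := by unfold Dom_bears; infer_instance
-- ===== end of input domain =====

-- B replaces A's 'previous'-flag pass over every adjacent pair by an index-jumping scan
-- (advance 2 past a match, else 1); same return value, simpler structure.


-- ===== PORT A =====
-- literal port of A; the output string is built on the List Char side (PySem convention) and
-- packed with String.ofList at the end; s[i]/s[i+1] are always in range for i in range(len(s)-1),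
-- so pyGetD with a dummy default is exact here.
def bears (x : Int) (s : String) : String × Bool :=
  let cs := s.toList
  let st :=
    (PySem.List.pyRange 0 ((cs.length : Int) - 1) 1).foldl
      (fun (st : List Char × Bool × Int) i =>
        let letters := [PySem.List.pyGetD cs i ' ', PySem.List.pyGetD cs (i + 1) ' ']
        if (letters = ['B', '8'] ∨ letters = ['8', 'B']) ∧ st.2.1 = false then
          (st.1 ++ letters, true, st.2.2 + 1)
        else
          (st.1, false, st.2.2))
      ([], false, (0 : Int))
  (String.ofList st.1, decide (x ≤ st.2.2))

-- ===== PORT B =====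
-- B's while-loop over the index i (s[i:i+2], advance 2 on a match else 1) is ported as the
-- equivalent structural recursion on the suffix of the character list; exact step for step.
def bearsScan : List Char → List (List Char)
  | a :: b :: rest =>
    if [a, b] = ['B', '8'] ∨ [a, b] = ['8', 'B'] then
      [a, b] :: bearsScan rest
    else
      bearsScan (b :: rest)
  | _ => []

def bears_alt (x : Int) (s : String) : String × Bool :=
  let parts := bearsScan s.toList
  (String.ofList parts.flatten, decide (x ≤ (parts.length : Int)))

-- ===== PRECONDITION & SPEC =====
def Spec_bears (x : Int) (s : String) (out : String × Bool) : Prop := out = bears_alt x s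
instance (x : Int) (s : String) (out : String × Bool) : Decidable (Spec_bears x s out) := by unfold Spec_bears; infer_instance

-- ===== CLAIM (what is proved, stated in full; the proofs are below) =====
def Claim_equal_bears : Prop := ∀ (x : Int) (s : String), Dom_bears x s → Spec_bears x s (bears x s)

-- ===== LEMMAS AND PROOFS =====

-- A's loop step, viewed as a function of the adjacent character pair.
def bearsStep (st : List Char × Bool × Int) (p : Char × Char) : List Char × Bool × Int :=
  let letters := [p.1, p.2]
  if (letters = ['B', '8'] ∨ letters = ['8', 'B']) ∧ st.2.1 = false then
    (st.1 ++ letters, true, st.2.2 + 1)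
  else
    (st.1, false, st.2.2)

-- HELPER

-- Pure-list form of bears_pairs_eq: Nat indices into getD.
lemma bears_pairs_range (cs : List Char) :
    (List.range (cs.length - 1)).map (fun k => (cs.getD k ' ', cs.getD (k + 1) ' '))
    = cs.zip cs.tail := by
  induction cs with
  | nil => simp
  | cons a t ih =>
    cases t with
    | nil => simp
    | cons b u =>
      have h : (a :: b :: u : List Char).length - 1 = u.length + 1 := by simp
      rw [h, List.range_succ_eq_map, List.map_cons, List.map_map]
      have h2 : ((b :: u : List Char).length - 1) = u.length := by simp
      rw [h2] at ih
      simp only [Function.comp_def, Nat.succ_eq_add_one, List.getD_cons_zero,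
        List.getD_cons_succ, List.tail_cons, List.zip_cons_cons] at ih ⊢
      exact congrArg _ ih

-- The index range of A's loop, mapped through the two lookups, is the list of adjacent pairs.
lemma bears_pairs_eq (cs : List Char) :
    (PySem.List.pyRange 0 ((cs.length : Int) - 1) 1).map
      (fun i => (PySem.List.pyGetD cs i ' ', PySem.List.pyGetD cs (i + 1) ' '))
    = cs.zip cs.tail := by
  rw [PySem.List.pyRange_one]
  have ht : (((cs.length : Int) - 1) - 0).toNat = cs.length - 1 := by omega
  rw [ht, List.map_map, ← bears_pairs_range cs]
  apply List.map_congr_left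
  intro k _
  have e1 : (0 : Int) + (k : Int) = ((k : Nat) : Int) := by ring
  have e2 : ((k : Int)) + 1 = (((k + 1 : Nat)) : Int) := by push_cast; ring
  simp only [Function.comp_def, e1, e2, PySem.List.pyGetD_natCast]

-- Running A's pair machine from a 'previous = false' state computes B's scan.
lemma bears_run_spec (cs : List Char) (out : List Char) (cnt : Int) :
    ((cs.zip cs.tail).foldl bearsStep (out, false, cnt)).1
      = out ++ (bearsScan cs).flatten ∧
    ((cs.zip cs.tail).foldl bearsStep (out, false, cnt)).2.2
      = cnt + ((bearsScan cs).length : Int) := by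
  induction cs using bearsScan.induct generalizing out cnt with
  | case1 a b rest h ih =>
    have hstep1 : bearsStep (out, false, cnt) (a, b) = (out ++ [a, b], true, cnt + 1) := by
      rcases h with h | h <;> simp [bearsStep, h]
    have hscan : bearsScan (a :: b :: rest) = [a, b] :: bearsScan rest := by
      rw [bearsScan, if_pos h]
    cases rest with
    | nil =>
      simp only [List.tail_cons, List.zip_cons_cons, List.zip_nil_right, List.foldl_cons,
        List.foldl_nil, hstep1, hscan]
      constructor <;> simp [bearsScan]
    | cons c r2 =>
      have hstep2 : bearsStep (out ++ [a, b], true, cnt + 1) (b, c) = (out ++ [a, b], false, cnt + 1) := by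
        simp [bearsStep]
      simp only [List.tail_cons, List.zip_cons_cons, List.foldl_cons, hstep1, hstep2, hscan]
      obtain ⟨i1, i2⟩ := ih (out ++ [a, b]) (cnt + 1)
      simp only [List.tail_cons] at i1 i2
      refine ⟨?_, ?_⟩
      · rw [i1]; simp
      · rw [i2]; simp; ring
  | case2 a b rest h ih =>
    have hstep : bearsStep (out, false, cnt) (a, b) = (out, false, cnt) := by
      simp only [bearsStep]
      rw [if_neg]
      rintro ⟨hm, -⟩
      exact h hm
    have hscan : bearsScan (a :: b :: rest) = bearsScan (b :: rest) := by
      rw [bearsScan, if_neg h]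
    simp only [List.tail_cons, List.zip_cons_cons, List.foldl_cons, hstep, hscan]
    obtain ⟨i1, i2⟩ := ih out cnt
    simp only [List.tail_cons] at i1 i2
    exact ⟨i1, i2⟩
  | case3 cs h =>
    match cs, h with
    | [], _ => simp [bearsScan]
    | [a], _ => simp [bearsScan]
    | a :: b :: r, h => exact absurd rfl (h a b r)

-- ===== VERDICT (by name: the statement is the Claim_ definition above) =====
theorem bears_spec : Claim_equal_bears := by
  intro x s _
  unfold Spec_bears bears bears_alt
  have hfold :
      (PySem.List.pyRange 0 ((s.toList.length : Int) - 1) 1).foldl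
        (fun (st : List Char × Bool × Int) i =>
          let letters := [PySem.List.pyGetD s.toList i ' ', PySem.List.pyGetD s.toList (i + 1) ' ']
          if (letters = ['B', '8'] ∨ letters = ['8', 'B']) ∧ st.2.1 = false then
            (st.1 ++ letters, true, st.2.2 + 1)
          else
            (st.1, false, st.2.2))
        ([], false, (0 : Int))
      = (s.toList.zip s.toList.tail).foldl bearsStep ([], false, (0 : Int)) := by
    rw [← bears_pairs_eq s.toList, List.foldl_map]
    rfl
  simp only [hfold]
  obtain ⟨h1, h2⟩ := bears_run_spec s.toList [] 0
  rw [h1, h2]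
  simp
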